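-- pv_equiv track=rewrite | github.com/fodorad/EmotionLinMulT | emotionlinmult/train/datamodule_hdf5.py | _get_available_regions
-- ===== SOURCE A (Python) =====
-- def _get_available_regions(mask, min_region_size=5):
--     if mask is None:
--         return [(0, len(mask))]
--     regions = []
--     start = None
--     for i, valid in enumerate(mask):
--         if valid and start is None:
--             start = i
--         elif not valid and start is not None:
--             if i - start >= min_region_size:
--                 regions.append((start, i))
--             start = None
--     if start is not None and len(mask) - start >= min_region_size:
--         regions.append((start, len(mask)))
--     return regions
-- ===== SOURCE B (Python) =====
-- # Run-iteration rewrite: walk the mask run by run with two indices instead of the start/None state machine.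
-- def _get_available_regions(mask, min_region_size=5):
--     if mask is None:
--         return [(0, len(mask))]
--     regions = []
--     n = len(mask)
--     i = 0
--     while i < n:
--         j = i
--         while j < n and bool(mask[j]) == bool(mask[i]):
--             j += 1
--         if mask[i] and j - i >= min_region_size:
--             regions.append((i, j))
--         i = j
--     return regions
-- ===== Notes on version B (the rewrite author's own statement) =====
-- stated objective: simpler
-- what changed: Replaces the start/None state machine plus post-loop flush with a two-index run-by-run scan that emits each qualifying true-run directly, needing no carried state or final fixup.
import Mathlib
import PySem

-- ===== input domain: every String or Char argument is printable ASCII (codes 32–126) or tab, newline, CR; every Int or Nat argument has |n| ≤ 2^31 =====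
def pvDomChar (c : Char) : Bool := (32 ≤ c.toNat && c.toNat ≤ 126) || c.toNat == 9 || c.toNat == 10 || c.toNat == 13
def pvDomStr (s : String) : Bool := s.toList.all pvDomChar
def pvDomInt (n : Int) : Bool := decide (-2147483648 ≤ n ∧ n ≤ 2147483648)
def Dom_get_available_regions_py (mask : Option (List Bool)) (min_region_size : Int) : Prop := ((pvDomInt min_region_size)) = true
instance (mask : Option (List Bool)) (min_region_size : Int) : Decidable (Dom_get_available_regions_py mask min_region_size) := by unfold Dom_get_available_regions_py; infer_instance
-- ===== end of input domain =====

-- B replaces A's start/None state machine with a run-by-run two-index scan (objective: simpler).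
-- Both programs raise TypeError on mask = None (the `len(mask)` of the None branch); Pre_ excludes it.

-- ===== PORT A =====
-- the for-loop over enumerate(mask): state = (regions, start)
def agaGo (min_region_size : Int) : List (Int × Bool) → List (Int × Int) → Option Int → (List (Int × Int) × Option Int)
  | [], regions, start => (regions, start)
  | (i, valid) :: rest, regions, start =>
    match start with
    | none =>
      if valid then agaGo min_region_size rest regions (some i)
      else agaGo min_region_size rest regions none
    | some s =>
      if valid then agaGo min_region_size rest regions (some s)
      else agaGo min_region_size rest
        (if i - s ≥ min_region_size then regions ++ [(s, i)] else regions) none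

-- the post-loop `if start is not None and len(mask) - start >= min_region_size` flush
def agaFin (m : List Bool) (min_region_size : Int) : List (Int × Int) × Option Int → List (Int × Int)
  | (regions, none) => regions
  | (regions, some s) =>
    if (m.length : Int) - s ≥ min_region_size then regions ++ [(s, (m.length : Int))] else regions

def get_available_regions_py (mask : Option (List Bool)) (min_region_size : Int) : List (Int × Int) :=
  match mask with
  | none => []  -- Python raises TypeError here (len(None)); excluded by Pre_
  | some m => agaFin m min_region_size (agaGo min_region_size (PySem.List.enumerate m 0) [] none)

-- ===== PORT B =====
-- inner while: advance j while mask[j] equals mask[i]'s truth value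
def altScanEnd (m : List Bool) (b : Bool) (j : Nat) : Nat :=
  if h : j < m.length then
    if m[j] = b then altScanEnd m b (j + 1) else j
  else j
termination_by m.length - j

theorem altScanEnd_ge (m : List Bool) (b : Bool) (j : Nat) : j ≤ altScanEnd m b j := by
  unfold altScanEnd
  split
  · split
    · exact Nat.le_trans (Nat.le_succ j) (altScanEnd_ge m b (j + 1))
    · exact Nat.le_refl j
  · exact Nat.le_refl j
termination_by m.length - j

-- outer while over run starts: emit the run if it is a qualifying true-run, jump to its end
def altOuter (m : List Bool) (min_region_size : Int) (i : Nat) : List (Int × Int) :=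
  if h : i < m.length then
    if m[i] ∧ ((altScanEnd m m[i] i : Int) - (i : Int) ≥ min_region_size) then
      ((i : Int), (altScanEnd m m[i] i : Int)) :: altOuter m min_region_size (altScanEnd m m[i] i)
    else altOuter m min_region_size (altScanEnd m m[i] i)
  else []
termination_by m.length - i
decreasing_by
  all_goals
    have h1 : i + 1 ≤ altScanEnd m m[i] i := by
      conv_rhs => rw [altScanEnd]
      rw [dif_pos h, if_pos rfl]
      exact altScanEnd_ge m m[i] (i + 1)
    omega

def get_available_regions_py_alt (mask : Option (List Bool)) (min_region_size : Int) : List (Int × Int) :=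
  match mask with
  | none => []  -- Python raises TypeError here (len(None)); excluded by Pre_
  | some m => altOuter m min_region_size 0

-- ===== PRECONDITION & SPEC =====
-- A raises TypeError on mask = None (it calls len(None)); that is the only input A does not return on.
def Pre_get_available_regions_py (mask : Option (List Bool)) (min_region_size : Int) : Prop := mask ≠ none
instance (mask : Option (List Bool)) (min_region_size : Int) : Decidable (Pre_get_available_regions_py mask min_region_size) := by unfold Pre_get_available_regions_py; infer_instance
def pvWitness_get_available_regions_py : Option (List Bool) × Int := (some [true, false, true, true], 2)

def Spec_get_available_regions_py (mask : Option (List Bool)) (min_region_size : Int) (out : List (Int × Int)) : Prop := out = get_available_regions_py_alt mask min_region_size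
instance (mask : Option (List Bool)) (min_region_size : Int) (out : List (Int × Int)) : Decidable (Spec_get_available_regions_py mask min_region_size out) := by unfold Spec_get_available_regions_py; infer_instance

-- ===== CLAIM (what is proved, stated in full; the proofs are below) =====
def Claim_equal_get_available_regions_py : Prop := ∀ (mask : Option (List Bool)) (min_region_size : Int), Dom_get_available_regions_py mask min_region_size → Pre_get_available_regions_py mask min_region_size → Spec_get_available_regions_py mask min_region_size (get_available_regions_py mask min_region_size)

-- ===== LEMMAS AND PROOFS =====

theorem altScanEnd_stop (m : List Bool) (b : Bool) (j : Nat)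
    (h : ∀ (hj : j < m.length), m[j] ≠ b) : altScanEnd m b j = j := by
  unfold altScanEnd
  split
  · rename_i hj
    exact if_neg (h hj)
  · rfl

theorem altScanEnd_step (m : List Bool) (b : Bool) (j : Nat)
    (hj : j < m.length) (hb : m[j] = b) : altScanEnd m b j = altScanEnd m b (j + 1) := by
  conv_lhs => rw [altScanEnd]
  rw [dif_pos hj, if_pos hb]

theorem altOuter_skip_false (m : List Bool) (min_region_size : Int) (i : Nat)
    (hi : i < m.length) (hf : m[i] = false) :
    altOuter m min_region_size i = altOuter m min_region_size (i + 1) := by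
  conv_lhs => rw [altOuter]
  rw [dif_pos hi]
  simp only [hf, Bool.false_eq_true, false_and, if_false]
  rw [altScanEnd_step m false i hi hf]
  by_cases h1 : i + 1 < m.length
  · by_cases h2 : m[i + 1] = false
    · conv_rhs => rw [altOuter]
      rw [dif_pos h1]
      simp only [h2, Bool.false_eq_true, false_and, if_false]
    · rw [altScanEnd_stop m false (i + 1) (fun _ => by simpa using h2)]
  · rw [altScanEnd_stop m false (i + 1) (fun hj => absurd hj h1)]

-- main loop invariant: A's remaining loop (over the enumeration of the suffix from i) followed
-- by the final flush equals acc ++ B's scan from i — for both loop states.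
theorem aga_invariant (m : List Bool) (min_region_size : Int) :
    ∀ (l : List Bool) (i : Nat), i ≤ m.length → l = m.drop i →
    (∀ acc, agaFin m min_region_size
        (agaGo min_region_size (PySem.List.enumerate l (i : Int)) acc none)
      = acc ++ altOuter m min_region_size i) ∧
    (∀ (s : Nat) (acc), s ≤ i → (∀ k (hk : k < m.length), s ≤ k → k < i → m[k] = true) →
      agaFin m min_region_size
        (agaGo min_region_size (PySem.List.enumerate l (i : Int)) acc (some (s : Int)))
      = (acc ++ (if ((altScanEnd m true i : Int) - (s : Int) ≥ min_region_size)
                then [((s : Int), (altScanEnd m true i : Int))] else []))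
            ++ altOuter m min_region_size (altScanEnd m true i)) := by
  intro l
  induction l with
  | nil =>
    intro i hi hdrop
    have hlen : i = m.length := by
      have := List.drop_eq_nil_iff.mp hdrop.symm
      omega
    constructor
    · intro acc
      simp only [PySem.List.enumerate_nil, agaGo, agaFin]
      rw [altOuter, dif_neg (by omega)]
      simp
    · intro s acc hs _
      have hscan : altScanEnd m true i = i := altScanEnd_stop m true i (fun hj => absurd hj (by omega))
      simp only [PySem.List.enumerate_nil, agaGo, agaFin, hscan]
      rw [altOuter, dif_neg (by omega)]
      subst hlen
      split <;> simp
  | cons b t ih =>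
    intro i hi hdrop
    have hb' : m[i]? = some b := by
      have h0 : (m.drop i)[0]? = some b := by rw [← hdrop]; rfl
      simpa [List.getElem?_drop] using h0
    obtain ⟨hi', hb⟩ := List.getElem?_eq_some_iff.mp hb'
    have ht : t = m.drop (i + 1) := by
      have h0 : (m.drop i).tail = t := by rw [← hdrop]; rfl
      simpa [List.tail_drop] using h0.symm
    have IH := ih (i + 1) (by omega) ht
    have hcast : (i : Int) + 1 = ((i + 1 : Nat) : Int) := by push_cast; ring
    rw [PySem.List.enumerate_cons]
    constructor
    · intro acc
      cases b with
      | false =>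
        simp only [agaGo, Bool.false_eq_true, if_false]
        rw [hcast, IH.1 acc, altOuter_skip_false m min_region_size i hi' hb]
      | true =>
        simp only [agaGo, if_true]
        rw [hcast, IH.2 i acc (by omega)
          (by intro k hk h1 h2
              have : k = i := by omega
              subst this; exact hb)]
        conv_rhs => rw [altOuter]
        rw [dif_pos hi']
        simp only [hb, true_and]
        rw [← altScanEnd_step m true i hi' hb]
        split <;> simp
    · intro s acc hs hall
      cases b with
      | true =>
        simp only [agaGo, if_true]
        rw [hcast, IH.2 s acc (by omega)
          (by intro k hk h1 h2
              by_cases hki : k = i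
              · subst hki; exact hb
              · exact hall k hk h1 (by omega)),
          ← altScanEnd_step m true i hi' hb]
      | false =>
        simp only [agaGo, Bool.false_eq_true, if_false]
        rw [hcast, IH.1, altScanEnd_stop m true i (fun _ => by simp [hb]),
          altOuter_skip_false m min_region_size i hi' hb]
        split <;> simp
  
-- ===== VERDICT (by name: the statement is the Claim_ definition above) =====
theorem get_available_regions_py_spec : Claim_equal_get_available_regions_py := by
  intro mask min_region_size _ hpre
  unfold Spec_get_available_regions_py
  cases mask with
  | none => exact absurd rfl hpre
  | some m =>
    have key := (aga_invariant m min_region_size m 0 (by omega) (by simp)).1 []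
    simp only [Nat.cast_zero, List.nil_append] at key
    show get_available_regions_py (some m) min_region_size = get_available_regions_py_alt (some m) min_region_size
    unfold get_available_regions_py get_available_regions_py_alt
    exact key
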